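-- pv_equiv track=rewrite | github.com/Maouv/Minimal | min/backend/vendor/editblock.py | replace_part_with_missing_leading_whitespace
-- ===== SOURCE A (Python) =====
-- def perfect_replace(whole_lines, part_lines, replace_lines):
--     part_tup = tuple(part_lines)
--     part_len = len(part_lines)
--     for i in range(len(whole_lines) - part_len + 1):
--         whole_tup = tuple(whole_lines[i : i + part_len])
--         if whole_tup == part_tup:
--             res = whole_lines[:i] + replace_lines + whole_lines[i + part_len :]
--             return "".join(res)
--
-- def replace_part_with_missing_leading_whitespace(whole_lines, part_lines, replace_lines):
--     leading = [len(p) - len(p.lstrip()) for p in part_lines if p.strip()]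
--     if leading and min(leading) > 0:
--         leading = min(leading)
--         part_lines = [p[leading:] if len(p) >= leading else p for p in part_lines]
--         replace_lines = [p[leading:] if len(p) >= leading else p for p in replace_lines]
--     res = match_but_for_leading_whitespace(whole_lines, part_lines)
--     if not res:
--         return
--     leading = res
--     replace_lines = [leading + rline if rline.strip() else rline for rline in replace_lines]
--     part_lines = [leading + pline for pline in part_lines]
--     return perfect_replace(whole_lines, part_lines, replace_lines)
--
-- def match_but_for_leading_whitespace(whole_lines, part_lines):
--     num = len(part_lines)
--     for i in range(len(whole_lines) - num + 1):
--         add = set()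
--         for j in range(num):
--             whole_line = whole_lines[i + j]
--             part_line = part_lines[j]
--             if whole_line == part_line:
--                 add.add("")
--                 continue
--             if not whole_line.endswith(part_line):
--                 break
--             add.add(whole_line[: len(whole_line) - len(part_line)])
--         else:
--             if len(add) == 1:
--                 return add.pop()
-- ===== SOURCE B (Python) =====
-- def replace_part_with_missing_leading_whitespace(whole_lines, part_lines, replace_lines):
--     # single pass: strip the common indent, then scan once for a position where every
--     # whole line ends with its part line under one common recovered prefix, and splice there
--     indents = [len(p) - len(p.lstrip()) for p in part_lines if p.strip()]
--     strip = min(indents) if indents else 0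
--     if strip > 0:
--         part_lines = [p[strip:] if len(p) >= strip else p for p in part_lines]
--         replace_lines = [r[strip:] if len(r) >= strip else r for r in replace_lines]
--     n = len(part_lines)
--     for i in range(len(whole_lines) - n + 1):
--         prefix = None
--         matched = True
--         for j in range(n):
--             w = whole_lines[i + j]
--             p = part_lines[j]
--             if not w.endswith(p):
--                 matched = False
--                 break
--             cur = w[: len(w) - len(p)]
--             if prefix is None:
--                 prefix = cur
--             elif cur != prefix:
--                 matched = False
--                 break
--         if matched and prefix is not None:
--             if not prefix:
--                 return None
--             new_lines = [prefix + r if r.strip() else r for r in replace_lines]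
--             return "".join(whole_lines[:i] + new_lines + whole_lines[i + n:])
--     return None
-- ===== Notes on version B (the rewrite author's own statement) =====
-- stated objective: simpler
-- what changed: B inlines A's three functions into one single scan that keeps one candidate prefix per position (instead of accumulating a set) and splices the replacement directly at the first matching position, eliminating perfect_replace's second exact-match pass and the re-prefixing of part_lines.
import Mathlib
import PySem

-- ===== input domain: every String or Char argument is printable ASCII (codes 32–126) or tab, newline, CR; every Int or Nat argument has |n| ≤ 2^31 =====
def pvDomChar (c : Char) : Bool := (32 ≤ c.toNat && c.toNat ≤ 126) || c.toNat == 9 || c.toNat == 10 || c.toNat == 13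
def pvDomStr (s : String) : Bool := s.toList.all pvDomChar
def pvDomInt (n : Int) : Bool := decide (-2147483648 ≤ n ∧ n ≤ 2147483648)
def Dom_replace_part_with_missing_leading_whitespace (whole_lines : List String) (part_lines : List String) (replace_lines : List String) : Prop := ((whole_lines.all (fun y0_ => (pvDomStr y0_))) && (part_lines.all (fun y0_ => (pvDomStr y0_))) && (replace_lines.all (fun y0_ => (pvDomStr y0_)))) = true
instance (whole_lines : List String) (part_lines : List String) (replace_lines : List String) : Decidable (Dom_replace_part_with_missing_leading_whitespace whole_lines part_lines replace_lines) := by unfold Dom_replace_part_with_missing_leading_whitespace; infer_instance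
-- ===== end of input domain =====

-- ===== PORT A =====
-- B inlines A's three helpers into one single scan that tracks one candidate prefix (no set, no
-- re-prefixing of part_lines, no second exact-match pass of perfect_replace): simpler, same behaviour.

-- helper for A's two identical list comprehensions "[p[leading:] if len(p) >= leading else p for p in lines]"
def pvStripA (lines : List String) (l : Int) : List String :=
  lines.map fun p => if l ≤ (PySem.Str.len p : Int) then PySem.Str.slice p (some l) none else p

-- "for i in range(...): if whole_lines[i:i+part_len] == part_tup: return ''.join(...)" of perfect_replace
def pvPerfectLoop (whole part repl : List String) : List Int → Option String
  | [] => none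
  | i :: rest =>
    if PySem.List.slice whole (some i) (some (i + (part.length : Int))) == part then
      some (PySem.Str.join "" (PySem.List.slice whole none (some i) ++ repl
        ++ PySem.List.slice whole (some (i + (part.length : Int))) none))
    else pvPerfectLoop whole part repl rest

def perfect_replace (whole_lines part_lines replace_lines : List String) : Option String :=
  pvPerfectLoop whole_lines part_lines replace_lines
    (PySem.List.pyRange 0 ((whole_lines.length : Int) - (part_lines.length : Int) + 1))

-- inner "for j in range(num)" of match_but_for_leading_whitespace; none = the loop broke
-- (indices i + j and j are always in range when called: i comes from range(len(whole)-num+1), j from range(num))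
def pvFuzzyInner (whole part : List String) (i : Int) : List Int → PySem.Set String → Option (PySem.Set String)
  | [], add => some add
  | j :: rest, add =>
    let whole_line := (PySem.List.pyGet? whole (i + j)).getD ""
    let part_line := (PySem.List.pyGet? part j).getD ""
    if whole_line == part_line then
      pvFuzzyInner whole part i rest (PySem.Set.add add "")
    else if !(PySem.Str.endswith whole_line part_line) then none
    else
      pvFuzzyInner whole part i rest (PySem.Set.add add
        (PySem.Str.slice whole_line none (some ((PySem.Str.len whole_line : Int) - (PySem.Str.len part_line : Int)))))

-- outer "for i in range(...)" with the for-else; add.pop() on a singleton set is its unique (head) element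
def pvFuzzyOuter (whole part : List String) : List Int → Option String
  | [] => none
  | i :: rest =>
    match pvFuzzyInner whole part i (PySem.List.pyRange 0 (part.length : Int)) PySem.Set.empty with
    | none => pvFuzzyOuter whole part rest
    | some add =>
      if PySem.Set.len add == 1 then some (add.head?.getD "")
      else pvFuzzyOuter whole part rest

def match_but_for_leading_whitespace (whole_lines part_lines : List String) : Option String :=
  pvFuzzyOuter whole_lines part_lines
    (PySem.List.pyRange 0 ((whole_lines.length : Int) - (part_lines.length : Int) + 1))

def replace_part_with_missing_leading_whitespace (whole_lines part_lines replace_lines : List String) : Option String :=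
  let leading := (part_lines.filter fun p => !(PySem.Str.strip p == "")).map
      (fun p => (PySem.Str.len p : Int) - (PySem.Str.len (PySem.Str.lstrip p) : Int))
  let doStrip := !leading.isEmpty && decide (0 < ((PySem.List.min? leading fun x => x).getD 0))
  let part_lines := if doStrip then pvStripA part_lines ((PySem.List.min? leading fun x => x).getD 0) else part_lines
  let replace_lines := if doStrip then pvStripA replace_lines ((PySem.List.min? leading fun x => x).getD 0) else replace_lines
  match match_but_for_leading_whitespace whole_lines part_lines with
  | none => none
  | some res =>
    if res == "" then none   -- "if not res: return" also drops an empty recovered prefix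
    else
      let replace_lines := replace_lines.map fun rline =>
        if !(PySem.Str.strip rline == "") then res ++ rline else rline
      let part_lines := part_lines.map fun pline => res ++ pline
      perfect_replace whole_lines part_lines replace_lines

-- ===== PORT B =====
-- helper for B's "[p[strip:] if len(p) >= strip else p for p in lines]"
def pvStripB (lines : List String) (l : Int) : List String :=
  lines.map fun r => if l ≤ (PySem.Str.len r : Int) then PySem.Str.slice r (some l) none else r

-- B's inner "for j in range(n)": none = matched False (break); some prefix? = loop completed
def pvScanInner (whole part : List String) (i : Int) : List Int → Option String → Option (Option String)
  | [], prefix? => some prefix?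
  | j :: rest, prefix? =>
    let w := (PySem.List.pyGet? whole (i + j)).getD ""
    let p := (PySem.List.pyGet? part j).getD ""
    if !(PySem.Str.endswith w p) then none
    else
      let cur := PySem.Str.slice w none (some ((PySem.Str.len w : Int) - (PySem.Str.len p : Int)))
      match prefix? with
      | none => pvScanInner whole part i rest (some cur)
      | some c => if cur == c then pvScanInner whole part i rest (some c) else none

-- B's outer "for i in range(...)": splice the re-prefixed replacement at the first matching position
def pvScanOuter (whole part repl : List String) : List Int → Option String
  | [] => none
  | i :: rest =>
    match pvScanInner whole part i (PySem.List.pyRange 0 (part.length : Int)) none with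
    | some (some pre) =>
      if pre == "" then none
      else some (PySem.Str.join "" (PySem.List.slice whole none (some i)
        ++ repl.map (fun r => if !(PySem.Str.strip r == "") then pre ++ r else r)
        ++ PySem.List.slice whole (some (i + (part.length : Int))) none))
    | _ => pvScanOuter whole part repl rest

def replace_part_with_missing_leading_whitespace_alt (whole_lines part_lines replace_lines : List String) : Option String :=
  let indents := (part_lines.filter fun p => !(PySem.Str.strip p == "")).map
      (fun p => (PySem.Str.len p : Int) - (PySem.Str.len (PySem.Str.lstrip p) : Int))
  let strip := if indents.isEmpty then 0 else (PySem.List.min? indents fun x => x).getD 0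
  let part_lines := if 0 < strip then pvStripB part_lines strip else part_lines
  let replace_lines := if 0 < strip then pvStripB replace_lines strip else replace_lines
  pvScanOuter whole_lines part_lines replace_lines
    (PySem.List.pyRange 0 ((whole_lines.length : Int) - (part_lines.length : Int) + 1))

-- ===== PRECONDITION & SPEC =====
def Spec_replace_part_with_missing_leading_whitespace (whole_lines : List String) (part_lines : List String) (replace_lines : List String) (out : Option String) : Prop := out = replace_part_with_missing_leading_whitespace_alt whole_lines part_lines replace_lines
instance (whole_lines : List String) (part_lines : List String) (replace_lines : List String) (out : Option String) : Decidable (Spec_replace_part_with_missing_leading_whitespace whole_lines part_lines replace_lines out) := by unfold Spec_replace_part_with_missing_leading_whitespace; infer_instance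

-- ===== CLAIM (what is proved, stated in full; the proofs are below) =====
def Claim_equal_replace_part_with_missing_leading_whitespace : Prop := ∀ (whole_lines : List String) (part_lines : List String) (replace_lines : List String), Dom_replace_part_with_missing_leading_whitespace whole_lines part_lines replace_lines → Spec_replace_part_with_missing_leading_whitespace whole_lines part_lines replace_lines (replace_part_with_missing_leading_whitespace whole_lines part_lines replace_lines)

-- ===== LEMMAS AND PROOFS =====

-- the line of `whole` at offset j from i, and the j-th part line (as the ports read them)
def pvW (whole : List String) (i j : Int) : String := (PySem.List.pyGet? whole (i + j)).getD ""
def pvP (part : List String) (j : Int) : String := (PySem.List.pyGet? part j).getD ""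

-- the recovered prefix at position i, as B's inner loop computes it
def pvAccept (whole part : List String) (i : Int) : Option String :=
  match pvScanInner whole part i (PySem.List.pyRange 0 (part.length : Int)) none with
  | some (some pre) => some pre
  | _ => none

-- key string fact: "w ends with p and w[:len(w)-len(p)] = s" is exactly "w = s + p"
theorem pv_decomp (w p s : String) :
    (PySem.Str.endswith w p = true ∧
      PySem.Str.slice w none (some ((PySem.Str.len w : Int) - (PySem.Str.len p : Int))) = s)
    ↔ w = s ++ p := by
  rw [String.ext_iff, PySem.Str.endswith_eq, PySem.Chars.endswith_iff, String.ext_iff,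
    PySem.Str.toList_slice, PySem.Chars.slice_eq_listSlice, String.toList_append,
    PySem.Str.len_eq, PySem.Str.len_eq]
  constructor
  · rintro ⟨⟨t, ht⟩, hs⟩
    have hlen : p.toList.length ≤ w.toList.length := by rw [← ht]; simp
    rw [show ((w.toList.length : Int) - (p.toList.length : Int)) = ((w.toList.length - p.toList.length : Nat) : Int) by omega,
      PySem.List.slice_to_natCast] at hs
    rw [← hs, ← ht]
    have : t.length = w.toList.length - p.toList.length := by rw [← ht]; simp
    simp
  · rintro h
    rw [h]
    refine ⟨⟨s.toList, rfl⟩, ?_⟩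
    rw [show (((s.toList ++ p.toList).length : Int) - (p.toList.length : Int)) = ((s.toList.length : Nat) : Int) by simp,
      PySem.List.slice_to_natCast, List.take_left]

theorem pv_scanInner_some_iff (whole part : List String) (i : Int) (js : List Int) (s : String) :
    ∀ c? : Option String,
    (match pvScanInner whole part i js c? with | some (some x) => some x | _ => none) = some s ↔
      ((∀ j ∈ js, pvW whole i j = s ++ pvP part j) ∧
        match c? with | some c => c = s | none => js ≠ []) := by
  induction js with
  | nil =>
    intro c?
    cases c? with
    | none => simp [pvScanInner]
    | some c => simp [pvScanInner]
  | cons j rest ih =>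
    intro c?
    by_cases hend : PySem.Str.endswith ((PySem.List.pyGet? whole (i + j)).getD "")
        ((PySem.List.pyGet? part j).getD "") = true
    · have hcur := fun (x : String) => pv_decomp ((PySem.List.pyGet? whole (i + j)).getD "")
        ((PySem.List.pyGet? part j).getD "") x
      cases c? with
      | none =>
        simp only [pvScanInner, hend, Bool.not_true, Bool.false_eq_true, if_false]
        rw [ih]
        simp only [pvW, pvP, List.forall_mem_cons, ne_eq, reduceCtorEq, not_false_iff, and_true]
        constructor
        · rintro ⟨hall, hc⟩
          exact ⟨(hcur s).mp ⟨hend, hc⟩, hall⟩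
        · rintro ⟨hj, hall⟩
          exact ⟨hall, ((hcur s).mpr hj).2⟩
      | some c =>
        simp only [pvScanInner, hend, Bool.not_true, Bool.false_eq_true, if_false]
        by_cases hec : PySem.Str.slice ((PySem.List.pyGet? whole (i + j)).getD "")
            none (some ((PySem.Str.len ((PySem.List.pyGet? whole (i + j)).getD "") : Int) -
              (PySem.Str.len ((PySem.List.pyGet? part j).getD "") : Int))) = c
        · rw [if_pos (by simpa using hec), ih]
          simp only [pvW, pvP, List.forall_mem_cons]
          constructor
          · rintro ⟨hall, hc⟩
            subst hc
            exact ⟨⟨(hcur c).mp ⟨hend, hec⟩, hall⟩, rfl⟩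
          · rintro ⟨⟨hj, hall⟩, hc⟩
            exact ⟨hall, hc⟩
        · rw [if_neg (by simpa using hec)]
          simp only [pvW, pvP, List.forall_mem_cons, reduceCtorEq, false_iff, not_and]
          rintro ⟨hj, hall⟩ hc
          subst hc
          exact hec ((hcur c).mpr hj).2
    · rw [Bool.not_eq_true] at hend
      have hss : ¬ (∀ j' ∈ j :: rest,
          (PySem.List.pyGet? whole (i + j')).getD "" = s ++ (PySem.List.pyGet? part j').getD "") := by
        intro hall
        have hj := hall j (by simp)
        have h1 := ((pv_decomp ((PySem.List.pyGet? whole (i + j)).getD "")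
          ((PySem.List.pyGet? part j).getD "") s).mpr hj).1
        rw [hend] at h1
        exact Bool.false_ne_true h1
      cases c? with
      | none =>
        simp only [pvScanInner, hend, Bool.not_false, if_true, pvW, pvP, reduceCtorEq, false_iff, not_and]
        intro hall
        exact absurd hall hss
      | some c =>
        simp only [pvScanInner, hend, Bool.not_false, if_true, pvW, pvP, reduceCtorEq, false_iff, not_and]
        intro hall
        exact absurd hall hss

def pvPostA (r : Option (PySem.Set String)) : Option String :=
  match r with
  | some add => if PySem.Set.len add == 1 then some (add.head?.getD "") else none
  | none => none

theorem pv_set_add_len {add : PySem.Set String} (x : String) :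
    add.length ≤ (PySem.Set.add add x).length := by
  simp only [PySem.Set.add]
  split <;> simp

theorem pv_fuzzyInner_big (whole part : List String) (i : Int) (js : List Int) :
    ∀ add : PySem.Set String, 2 ≤ add.length →
    pvPostA (pvFuzzyInner whole part i js add) = none := by
  induction js with
  | nil =>
    intro add h
    simp only [pvFuzzyInner, pvPostA, PySem.Set.len]
    rw [if_neg (by simp; omega)]
  | cons j rest ih =>
    intro add h
    simp only [pvFuzzyInner]
    split
    · exact ih _ (le_trans h (pv_set_add_len _))
    · split
      · rfl
      · exact ih _ (le_trans h (pv_set_add_len _))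

theorem pv_fuzzyInner_single (whole part : List String) (i : Int) (js : List Int) :
    ∀ c : String,
    pvPostA (pvFuzzyInner whole part i js [c]) =
      (match pvScanInner whole part i js (some c) with | some (some x) => some x | _ => none) := by
  induction js with
  | nil =>
    intro c
    simp [pvFuzzyInner, pvScanInner, pvPostA, PySem.Set.len]
  | cons j rest ih =>
    intro c
    by_cases hwp : (PySem.List.pyGet? whole (i + j)).getD "" = (PySem.List.pyGet? part j).getD ""
    · have hd := (pv_decomp ((PySem.List.pyGet? whole (i + j)).getD "")
        ((PySem.List.pyGet? part j).getD "") "").mpr (by rw [hwp]; simp)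
      have hwp' : ((PySem.List.pyGet? whole (i + j)).getD "" ==
          (PySem.List.pyGet? part j).getD "") = true := by simpa using hwp
      simp only [pvFuzzyInner, pvScanInner, hwp', hd.1, hd.2, if_true,
        Bool.not_true, Bool.false_eq_true, if_false]
      by_cases hc : c = ""
      · subst hc
        rw [show PySem.Set.add [""] "" = [""] by simp [PySem.Set.add, PySem.Set.contains],
          if_pos (by simp)]
        exact ih ""
      · rw [show PySem.Set.add [c] "" = [c, ""] by
            simp [PySem.Set.add, PySem.Set.contains, Ne.symm hc],
          if_neg (by simpa using fun h : ("" : String) = c => hc h.symm)]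
        exact pv_fuzzyInner_big whole part i rest [c, ""] (by simp)
    · have hwp' : ((PySem.List.pyGet? whole (i + j)).getD "" ==
          (PySem.List.pyGet? part j).getD "") = false := by simpa using hwp
      by_cases hend : PySem.Str.endswith ((PySem.List.pyGet? whole (i + j)).getD "")
          ((PySem.List.pyGet? part j).getD "") = true
      · simp only [pvFuzzyInner, pvScanInner, hwp', hend, Bool.false_eq_true, if_false,
          Bool.not_true]
        generalize PySem.Str.slice ((PySem.List.pyGet? whole (i + j)).getD "")
            none (some ((PySem.Str.len ((PySem.List.pyGet? whole (i + j)).getD "") : Int) -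
              (PySem.Str.len ((PySem.List.pyGet? part j).getD "") : Int))) = X
        by_cases hec : X = c
        · subst hec
          rw [show PySem.Set.add [X] X = [X] by simp [PySem.Set.add, PySem.Set.contains],
            if_pos (by simp)]
          exact ih X
        · rw [show PySem.Set.add [c] X = [c, X] by
              simp [PySem.Set.add, PySem.Set.contains, hec],
            if_neg (by simpa using hec)]
          exact pv_fuzzyInner_big whole part i rest _ (by simp)
      · have hend' : PySem.Str.endswith ((PySem.List.pyGet? whole (i + j)).getD "")
            ((PySem.List.pyGet? part j).getD "") = false := by simpa using hend
        simp only [pvFuzzyInner, pvScanInner, hwp', hend', Bool.false_eq_true, if_false,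
          Bool.not_false, if_true, pvPostA]

theorem pv_fuzzyInner_empty (whole part : List String) (i : Int) (js : List Int) :
    pvPostA (pvFuzzyInner whole part i js PySem.Set.empty) =
      (match pvScanInner whole part i js none with | some (some x) => some x | _ => none) := by
  cases js with
  | nil => simp [pvFuzzyInner, pvScanInner, pvPostA, PySem.Set.len, PySem.Set.empty]
  | cons j rest =>
    by_cases hwp : (PySem.List.pyGet? whole (i + j)).getD "" = (PySem.List.pyGet? part j).getD ""
    · have hd := (pv_decomp ((PySem.List.pyGet? whole (i + j)).getD "")
        ((PySem.List.pyGet? part j).getD "") "").mpr (by rw [hwp]; simp)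
      have hwp' : ((PySem.List.pyGet? whole (i + j)).getD "" ==
          (PySem.List.pyGet? part j).getD "") = true := by simpa using hwp
      simp only [pvFuzzyInner, pvScanInner, hwp', hd.1, hd.2, if_true,
        Bool.not_true, Bool.false_eq_true, if_false]
      rw [show PySem.Set.add PySem.Set.empty "" = [""] by
        simp [PySem.Set.add, PySem.Set.contains, PySem.Set.empty]]
      exact pv_fuzzyInner_single whole part i rest ""
    · have hwp' : ((PySem.List.pyGet? whole (i + j)).getD "" ==
          (PySem.List.pyGet? part j).getD "") = false := by simpa using hwp
      by_cases hend : PySem.Str.endswith ((PySem.List.pyGet? whole (i + j)).getD "")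
          ((PySem.List.pyGet? part j).getD "") = true
      · simp only [pvFuzzyInner, pvScanInner, hwp', hend, Bool.false_eq_true, if_false,
          Bool.not_true]
        generalize PySem.Str.slice ((PySem.List.pyGet? whole (i + j)).getD "")
            none (some ((PySem.Str.len ((PySem.List.pyGet? whole (i + j)).getD "") : Int) -
              (PySem.Str.len ((PySem.List.pyGet? part j).getD "") : Int))) = X
        rw [show PySem.Set.add PySem.Set.empty X = [X] by
          simp [PySem.Set.add, PySem.Set.contains, PySem.Set.empty]]
        exact pv_fuzzyInner_single whole part i rest X
      · have hend' : PySem.Str.endswith ((PySem.List.pyGet? whole (i + j)).getD "")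
            ((PySem.List.pyGet? part j).getD "") = false := by simpa using hend
        simp only [pvFuzzyInner, pvScanInner, hwp', hend', Bool.false_eq_true, if_false,
          Bool.not_false, if_true, pvPostA]

theorem pv_fuzzyOuter_eq (whole part : List String) (js : List Int) :
    pvFuzzyOuter whole part js = js.findSome? (pvAccept whole part) := by
  induction js with
  | nil => simp [pvFuzzyOuter]
  | cons i rest ih =>
    have h : pvPostA (pvFuzzyInner whole part i (PySem.List.pyRange 0 (part.length : Int))
        ([] : PySem.Set String)) =
        (match pvScanInner whole part i (PySem.List.pyRange 0 (part.length : Int)) none with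
          | some (some x) => some x | _ => none) :=
      pv_fuzzyInner_empty whole part i (PySem.List.pyRange 0 (part.length : Int))
    rw [List.findSome?_cons]
    have hacc : pvAccept whole part i =
        (match pvScanInner whole part i (PySem.List.pyRange 0 (part.length : Int)) none with
          | some (some x) => some x | _ => none) := rfl
    cases hA : pvFuzzyInner whole part i (PySem.List.pyRange 0 (part.length : Int))
        ([] : PySem.Set String) with
    | none =>
      have hA' : pvFuzzyInner whole part i (PySem.List.pyRange 0 (part.length : Int))
          PySem.Set.empty = none := hA
      rw [hA] at h
      simp only [pvPostA] at h
      rw [show pvFuzzyOuter whole part (i :: rest) =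
        pvFuzzyOuter whole part rest by simp only [pvFuzzyOuter, hA'], ih, hacc, ← h]
    | some add =>
      have hA' : pvFuzzyInner whole part i (PySem.List.pyRange 0 (part.length : Int))
          PySem.Set.empty = some add := hA
      rw [hA] at h
      simp only [pvPostA] at h
      by_cases hlen : (PySem.Set.len add == 1) = true
      · rw [if_pos hlen] at h
        rw [show pvFuzzyOuter whole part (i :: rest) =
          some (add.head?.getD "") by simp only [pvFuzzyOuter, hA']; rw [if_pos hlen], hacc, ← h]
      · rw [if_neg hlen] at h
        rw [show pvFuzzyOuter whole part (i :: rest) = pvFuzzyOuter whole part rest by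
            simp only [pvFuzzyOuter, hA']; rw [if_neg hlen],
          ih, hacc, ← h]

def pvBuild (whole repl : List String) (n : Nat) (i : Int) (s : String) : String :=
  PySem.Str.join "" (PySem.List.slice whole none (some i)
    ++ repl.map (fun r => if !(PySem.Str.strip r == "") then s ++ r else r)
    ++ PySem.List.slice whole (some (i + (n : Int))) none)

theorem pv_scanOuter_eq (whole part repl : List String) (js : List Int) :
    pvScanOuter whole part repl js =
      match js.findSome? (fun i => (pvAccept whole part i).map (fun s => (i, s))) with
      | none => none
      | some (i, s) => if s = "" then none else some (pvBuild whole repl part.length i s) := by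
  induction js with
  | nil => simp [pvScanOuter]
  | cons i rest ih =>
    rw [List.findSome?_cons]
    cases hA : pvScanInner whole part i (PySem.List.pyRange 0 (part.length : Int)) none with
    | none =>
      rw [show pvScanOuter whole part repl (i :: rest) = pvScanOuter whole part repl rest by
        simp [pvScanOuter, hA], ih, show pvAccept whole part i = none by simp [pvAccept, hA]]
      simp
    | some pre? =>
      cases pre? with
      | none =>
        rw [show pvScanOuter whole part repl (i :: rest) = pvScanOuter whole part repl rest by
          simp [pvScanOuter, hA], ih, show pvAccept whole part i = none by simp [pvAccept, hA]]
        simp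
      | some pre =>
        rw [show pvAccept whole part i = some pre by simp [pvAccept, hA]]
        simp only [Option.map_some]
        by_cases hpre : pre = ""
        · subst hpre
          rw [show pvScanOuter whole part repl (i :: rest) = none by simp [pvScanOuter, hA],
            if_pos rfl]
        · rw [show pvScanOuter whole part repl (i :: rest) =
            some (PySem.Str.join "" (PySem.List.slice whole none (some i)
              ++ repl.map (fun r => if !(PySem.Str.strip r == "") then pre ++ r else r)
              ++ PySem.List.slice whole (some (i + (part.length : Int))) none)) by
              simp [pvScanOuter, hA]; intro hc; exact absurd hc hpre]
          rw [if_neg hpre]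
          rfl

theorem pv_accept_iff (whole part : List String) (i : Int) (s : String) :
    pvAccept whole part i = some s ↔
      ((∀ k < part.length, pvW whole i (k : Int) = s ++ pvP part (k : Int)) ∧ part ≠ []) := by
  have h := pv_scanInner_some_iff whole part i (PySem.List.pyRange 0 (part.length : Int)) s none
  rw [show pvAccept whole part i =
    (match pvScanInner whole part i (PySem.List.pyRange 0 (part.length : Int)) none with
      | some (some x) => some x | _ => none) from rfl, h,
    PySem.List.pyRange_zero_natCast]
  constructor
  · rintro ⟨hall, hne⟩
    refine ⟨fun k hk => hall (k : Int) (by simp only [List.mem_map, List.mem_range]; exact ⟨k, hk, rfl⟩), ?_⟩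
    intro hp
    subst hp
    simp at hne
  · rintro ⟨hall, hne⟩
    refine ⟨?_, ?_⟩
    · intro j hj
      simp only [List.mem_map, List.mem_range] at hj
      obtain ⟨k, hk, rfl⟩ := hj
      exact hall k hk
    · have := List.length_pos_iff.mpr hne
      simp only [ne_eq, List.map_eq_nil_iff, List.range_eq_nil]
      omega

theorem pv_slice_eq_iff (whole part : List String) (s : String) (i : Int)
    (h0 : 0 ≤ i) (hn : i.toNat + part.length ≤ whole.length) :
    (PySem.List.slice whole (some i) (some (i + (part.length : Int))) = part.map (fun p => s ++ p)) ↔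
      (∀ k < part.length, pvW whole i (k : Int) = s ++ pvP part (k : Int)) := by
  have hi : i = ((i.toNat : Nat) : Int) := (Int.toNat_of_nonneg h0).symm
  rw [hi, PySem.List.slice_natCast_add]
  have hW : ∀ k : Nat, pvW whole ((i.toNat : Nat) : Int) (k : Int) = whole[i.toNat + k]?.getD "" := by
    intro k
    simp only [pvW]
    rw [show ((i.toNat : Nat) : Int) + (k : Int) = ((i.toNat + k : Nat) : Int) by push_cast; ring,
      PySem.List.pyGet?_natCast]
  have hP : ∀ k : Nat, pvP part (k : Int) = part[k]?.getD "" := by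
    intro k
    simp only [pvP]
    rw [PySem.List.pyGet?_natCast]
  have hlen : (List.take part.length (List.drop i.toNat whole)).length = part.length := by
    simp only [List.length_take, List.length_drop]
    omega
  constructor
  · intro heq k hk
    have h1 := congrArg (fun l => l[k]?) heq
    simp only at h1
    rw [List.getElem?_take_of_lt hk, List.getElem?_drop, List.getElem?_map] at h1
    cases hp : part[k]? with
    | none => exact absurd hp (by simp [List.getElem?_eq_getElem hk])
    | some p =>
      rw [hp] at h1
      rw [hW k, hP k, h1, hp]
      rfl
  · intro hall
    apply List.ext_getElem?
    intro k
    by_cases hk : k < part.length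
    · rw [List.getElem?_take_of_lt hk, List.getElem?_drop, List.getElem?_map]
      have := hall k hk
      rw [hW k, hP k] at this
      rw [List.getElem?_eq_getElem hk,
        List.getElem?_eq_getElem (show i.toNat + k < whole.length by omega)]
      rw [List.getElem?_eq_getElem (show i.toNat + k < whole.length by omega),
        List.getElem?_eq_getElem hk] at this
      simp only [Option.getD_some] at this
      simp [this]
    · rw [List.getElem?_eq_none (by omega), List.getElem?_eq_none (by simp; omega)]

theorem pv_perfectLoop_found (whole part repl : List String) (post : List Int) (i : Int) :
    ∀ pre : List Int,
    (∀ i' ∈ pre, ¬ (PySem.List.slice whole (some i') (some (i' + (part.length : Int))) = part)) →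
    (PySem.List.slice whole (some i) (some (i + (part.length : Int))) = part) →
    pvPerfectLoop whole part repl (pre ++ i :: post) =
      some (PySem.Str.join "" (PySem.List.slice whole none (some i) ++ repl
        ++ PySem.List.slice whole (some (i + (part.length : Int))) none)) := by
  intro pre
  induction pre with
  | nil =>
    intro _ hi
    simp only [List.nil_append, pvPerfectLoop]
    rw [if_pos (by simpa using hi)]
  | cons p' pre' ih =>
    intro hpre hi
    simp only [List.cons_append, pvPerfectLoop]
    rw [if_neg (by simpa using hpre p' (by simp))]
    exact ih (fun x hx => hpre x (by simp [hx])) hi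

theorem pv_findSome?_map_snd (js : List Int) (f : Int → Option String) :
    js.findSome? f = (js.findSome? (fun i => (f i).map (fun s => (i, s)))).map Prod.snd := by
  induction js with
  | nil => simp
  | cons i rest ih =>
    rw [List.findSome?_cons, List.findSome?_cons]
    cases hf : f i <;> simp [ih]

theorem pv_core (whole part2 repl2 : List String) :
    (match match_but_for_leading_whitespace whole part2 with
     | none => none
     | some res => if res == "" then none else
         perfect_replace whole (part2.map fun pline => res ++ pline)
           (repl2.map fun rline => if !(PySem.Str.strip rline == "") then res ++ rline else rline)) =
    pvScanOuter whole part2 repl2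
      (PySem.List.pyRange 0 ((whole.length : Int) - (part2.length : Int) + 1)) := by
  rw [pv_scanOuter_eq,
    show match_but_for_leading_whitespace whole part2 = pvFuzzyOuter whole part2
      (PySem.List.pyRange 0 ((whole.length : Int) - (part2.length : Int) + 1)) from rfl,
    pv_fuzzyOuter_eq, pv_findSome?_map_snd]
  cases hF : (PySem.List.pyRange 0 ((whole.length : Int) - (part2.length : Int) + 1)).findSome?
      (fun i => (pvAccept whole part2 i).map (fun s => (i, s))) with
  | none => simp
  | some p =>
    obtain ⟨i, s⟩ := p
    simp only [Option.map_some]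
    by_cases hs : s = ""
    · subst hs
      rw [if_pos (by simp), if_pos rfl]
    · rw [if_neg (by simpa using hs), if_neg hs]
      obtain ⟨pre, a, post, hsplit, ha, hpre⟩ := List.findSome?_eq_some_iff.mp hF
      rw [Option.map_eq_some_iff] at ha
      obtain ⟨x, hax, hpair⟩ := ha
      injection hpair with h1 h2
      subst h1
      subst h2
      obtain ⟨hall, hne⟩ := (pv_accept_iff whole part2 a x).mp hax
      have haR : a ∈ PySem.List.pyRange 0 ((whole.length : Int) - (part2.length : Int) + 1) := by
        rw [hsplit]; simp
      rw [PySem.List.mem_pyRange_one] at haR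
      have hbound : a.toNat + part2.length ≤ whole.length := by omega
      rw [show perfect_replace whole (part2.map fun pline => x ++ pline)
          (repl2.map fun rline => if !(PySem.Str.strip rline == "") then x ++ rline else rline) =
        pvPerfectLoop whole (part2.map fun pline => x ++ pline)
          (repl2.map fun rline => if !(PySem.Str.strip rline == "") then x ++ rline else rline)
          (PySem.List.pyRange 0 ((whole.length : Int) -
            ((part2.map fun pline => x ++ pline).length : Int) + 1)) from rfl,
        List.length_map, hsplit]
      rw [pv_perfectLoop_found whole _ _ post a pre ?_ ?_]
      · simp only [pvBuild, List.length_map]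
      · intro i' hi'
        have hi'R : i' ∈ PySem.List.pyRange 0 ((whole.length : Int) - (part2.length : Int) + 1) := by
          rw [hsplit]; simp [hi']
        rw [PySem.List.mem_pyRange_one] at hi'R
        rw [List.length_map, pv_slice_eq_iff whole part2 x i' hi'R.1 (by omega)]
        intro hcontra
        have hsome : pvAccept whole part2 i' = some x :=
          (pv_accept_iff whole part2 i' x).mpr ⟨hcontra, hne⟩
        have hnone := hpre i' hi'
        rw [hsome] at hnone
        simp at hnone
      · rw [List.length_map, pv_slice_eq_iff whole part2 x a haR.1 hbound]
        exact hall

theorem pv_strip_eq : pvStripA = pvStripB := rfl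

theorem pv_final (w p r : List String) :
    replace_part_with_missing_leading_whitespace w p r =
      replace_part_with_missing_leading_whitespace_alt w p r := by
  simp only [replace_part_with_missing_leading_whitespace,
    replace_part_with_missing_leading_whitespace_alt]
  generalize hL : ((p.filter fun q => !(PySem.Str.strip q == "")).map
      (fun q => (PySem.Str.len q : Int) - (PySem.Str.len (PySem.Str.lstrip q) : Int))) = L
  by_cases hE : L.isEmpty
  · have h1 : (!L.isEmpty && decide (0 < ((PySem.List.min? L fun x => x).getD 0))) = false := by
      simp [hE]
    have h2 : (if L.isEmpty then (0 : Int) else (PySem.List.min? L fun x => x).getD 0) = 0 := by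
      simp [hE]
    rw [h1, h2]
    simp only [Bool.false_eq_true, if_false, lt_irrefl]
    exact pv_core w p r
  · have hE' : L.isEmpty = false := by simpa using hE
    rw [show (if L.isEmpty then (0 : Int) else (PySem.List.min? L fun x => x).getD 0) =
      ((PySem.List.min? L fun x => x).getD 0) by rw [hE']; simp]
    by_cases hm : 0 < ((PySem.List.min? L fun x => x).getD 0)
    · have h1 : (!L.isEmpty && decide (0 < ((PySem.List.min? L fun x => x).getD 0))) = true := by
        simp [hE', hm]
      rw [h1, if_pos rfl, if_pos rfl, if_pos hm, if_pos hm, pv_strip_eq]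
      exact pv_core w _ _
    · have h1 : (!L.isEmpty && decide (0 < ((PySem.List.min? L fun x => x).getD 0))) = false := by
        simp [hm]
      rw [h1, if_neg (by simp), if_neg (by simp), if_neg hm, if_neg hm]
      exact pv_core w p r

-- ===== VERDICT (by name: the statement is the Claim_ definition above) =====
theorem replace_part_with_missing_leading_whitespace_spec : Claim_equal_replace_part_with_missing_leading_whitespace := by
  intro whole_lines part_lines replace_lines _
  unfold Spec_replace_part_with_missing_leading_whitespace
  exact pv_final whole_lines part_lines replace_lines
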